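-- pv_equiv track=rewrite | github.com/dillonwu-97/competitive_programming | codeforces/dream.py | solve
-- ===== SOURCE A (Python) =====
-- def solve(inp, counter):
-- 	inp = list(set(inp))
-- 	inp.sort()
-- 	save = 0
-- 	track = 0 # keeps track of input list
-- 	while counter!= 0 or track < len(inp):
-- 		if track >= len(inp):
-- 			save += counter
-- 			break
-- 		if (inp[track] == save+1):
-- 			save+=1
-- 			track+=1
-- 		elif track < len(inp) and counter == 0:
-- 			if inp[track] == inp[track-1]+1:
-- 				save+=1
-- 				track+=1
-- 				continue
-- 			else:
-- 				break
-- 		else: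
-- 			counter-=1
-- 			save+=1
-- 	return save
-- ===== SOURCE B (Python) =====
-- def solve(inp, counter):
--     prev = 0
--     for x in sorted(set(inp)):
--         gap = x - prev - 1
--         if gap < 0 or gap > counter:
--             return prev + counter
--         counter -= gap
--         prev = x
--     return prev + counter
-- ===== Notes on version B (the rewrite author's own statement) =====
-- stated objective: alternative
-- what changed: A simulates the greedy one budget unit per while-loop iteration (up to counter iterations inside the gaps); B makes a single pass over sorted(set(inp)) and subtracts each whole gap from the budget arithmetically, with no per-unit stepping.
-- outside the precondition, e.g. on solve([2], -1): A returns 0, B returns -1; on solve([0], -1): A does not finish within the time limit, B returns -1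
import Mathlib
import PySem

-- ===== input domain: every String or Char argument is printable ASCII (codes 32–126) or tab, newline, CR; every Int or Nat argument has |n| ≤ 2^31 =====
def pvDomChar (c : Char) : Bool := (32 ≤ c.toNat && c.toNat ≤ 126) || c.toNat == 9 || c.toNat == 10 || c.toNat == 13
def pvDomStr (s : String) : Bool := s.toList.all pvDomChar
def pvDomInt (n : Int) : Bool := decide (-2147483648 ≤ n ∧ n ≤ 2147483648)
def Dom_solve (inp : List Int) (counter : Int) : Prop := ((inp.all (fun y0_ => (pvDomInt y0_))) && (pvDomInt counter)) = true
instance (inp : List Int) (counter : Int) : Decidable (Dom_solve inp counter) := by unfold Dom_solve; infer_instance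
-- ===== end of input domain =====

-- B replaces A's unit-by-unit while loop (one iteration per consumed budget unit) by a single
-- pass over sorted(set(inp)) that subtracts each gap from the budget arithmetically.

-- ===== PORT A =====
-- A's while loop, state (save, track, counter) exactly as in the Python; fuel only makes the
-- recursion total (under Pre_solve the loop performs at most len + counter iterations, so the
-- fuel chosen in `solve` is never exhausted; the 0-fuel value is never reached).
-- List accesses inp[track] / inp[track-1] are in range whenever Python reaches them, so .getD 0
-- is exact there.
def solveLoopA (l : List Int) (fuel : Nat) (save track counter : Int) : Int :=
  match fuel with
  | 0 => save
  | f + 1 =>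
    if counter ≠ 0 ∨ track < (l.length : Int) then
      if track ≥ (l.length : Int) then save + counter
      else if (PySem.List.pyGet? l track).getD 0 = save + 1 then
        solveLoopA l f (save + 1) (track + 1) counter
      else if track < (l.length : Int) ∧ counter = 0 then
        if (PySem.List.pyGet? l track).getD 0 = (PySem.List.pyGet? l (track - 1)).getD 0 + 1 then
          solveLoopA l f (save + 1) (track + 1) counter
        else save
      else
        solveLoopA l f (save + 1) track (counter - 1)
    else save

def solve (inp : List Int) (counter : Int) : Int :=
  let l := PySem.List.sorted (PySem.Set.ofList inp) (fun x => x) false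
  solveLoopA l (counter.toNat + l.length + 1) 0 0 counter

-- ===== PORT B =====
def solveAltGo : List Int → Int → Int → Int
  | [], prev, c => prev + c
  | x :: rest, prev, c =>
    let gap := x - prev - 1
    if gap < 0 ∨ gap > c then prev + c else solveAltGo rest x (c - gap)

def solve_alt (inp : List Int) (counter : Int) : Int :=
  solveAltGo (PySem.List.sorted (PySem.Set.ofList inp) (fun x => x) false) 0 counter

-- ===== PRECONDITION & SPEC =====
-- Pre_solve excludes negative counters, the only inputs outside the task's domain: there A's
-- unit-by-unit loop either never terminates (e.g. inp=[0], counter=-1) or folds the leftover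
-- negative budget into the answer, a value B's batch loop does not produce.
def Pre_solve (inp : List Int) (counter : Int) : Prop := 0 ≤ counter
instance (inp : List Int) (counter : Int) : Decidable (Pre_solve inp counter) := by
  unfold Pre_solve; infer_instance

def pvWitness_solve : List Int × Int := ([1, 2, 5], 3)

def Spec_solve (inp : List Int) (counter : Int) (out : Int) : Prop := out = solve_alt inp counter
instance (inp : List Int) (counter : Int) (out : Int) : Decidable (Spec_solve inp counter out) := by
  unfold Spec_solve; infer_instance

-- ===== CLAIM (what is proved, stated in full; the proofs are below) =====
def Claim_equal_solve : Prop := ∀ (inp : List Int) (counter : Int), Dom_solve inp counter → Pre_solve inp counter → Spec_solve inp counter (solve inp counter)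

-- ===== LEMMAS AND PROOFS =====

-- B's loop absorbs one unit-spend of A: if the next element does not match and there is budget,
-- bumping prev's side (save+1, counter-1) does not change B's result.
lemma solveAltGo_spend (x : Int) (rest : List Int) (prev c : Int)
    (hx : x ≠ prev + 1) (hc : c ≠ 0) (hc0 : 0 ≤ c) :
    solveAltGo (x :: rest) prev c = solveAltGo (x :: rest) (prev + 1) (c - 1) := by
  simp only [solveAltGo]
  by_cases h1 : x - prev - 1 < 0
  · rw [if_pos (Or.inl h1), if_pos (Or.inl (by omega))]
    omega
  · have hgt : x - prev - 1 > 0 := by omega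
    by_cases h2 : x - prev - 1 > c
    · rw [if_pos (Or.inr h2), if_pos (Or.inr (by omega))]
      omega
    · rw [if_neg (by omega), if_neg (by omega)]
      congr 1
      omega

lemma pyGet_sorted_at {l : List Int} {t : Nat} (ht : t < l.length) :
    (PySem.List.pyGet? l (t : Int)).getD 0 = l[t] := by
  simp [PySem.List.pyGet?_natCast, List.getElem?_eq_getElem ht]

-- main loop correspondence, by induction on fuel
lemma loopA_eq_loopB : ∀ (fuel : Nat) (l : List Int) (save counter : Int) (track : Nat),
    l.Pairwise (· < ·) → 0 ≤ save → 0 ≤ counter → track ≤ l.length →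
    (0 < track → l[track - 1]! ≤ save ∧ (track < l.length → save < l[track]!)) →
    counter.toNat + (l.length - track) < fuel →
    solveLoopA l fuel save (track : Int) counter = solveAltGo (l.drop track) save counter := by
  intro fuel
  induction fuel with
  | zero => intro l save counter track _ _ _ _ _ hf; omega
  | succ f ih =>
    intro l save counter track hsort hsave hc htle hinv hf
    have hmono : ∀ (i j : Nat) (hij : i < j) (hj : j < l.length), l[i]'(Nat.lt_trans hij hj) < l[j] :=
      fun i j hij hj => List.pairwise_iff_getElem.mp hsort i j (Nat.lt_trans hij hj) hj hij
    by_cases hend : track = l.length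
    · subst hend
      simp only [solveLoopA, List.drop_length, solveAltGo]
      by_cases hc0 : counter = 0
      · subst hc0
        rw [if_neg (by simp)]
        omega
      · rw [if_pos (Or.inl hc0), if_pos (by omega)]
    · have htlt : track < l.length := by omega
      have hdrop : l.drop track = l[track] :: l.drop (track + 1) :=
        List.drop_eq_getElem_cons htlt
      have hget : (PySem.List.pyGet? l (track : Int)).getD 0 = l[track] := pyGet_sorted_at htlt
      simp only [solveLoopA]
      rw [if_pos (Or.inr (by exact_mod_cast htlt))]
      rw [if_neg (by push_cast; omega), hget]
      set x := l[track] with hx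
      by_cases hmatch : x = save + 1
      · -- first branch: consume the element
        rw [if_pos hmatch]
        have hcast : ((track : Int) + 1) = ((track + 1 : Nat) : Int) := by push_cast; ring
        rw [hcast, ih l (save + 1) counter (track + 1) hsort (by omega) hc (by omega) ?_ (by omega)]
        · rw [hdrop]
          simp only [solveAltGo]
          rw [if_neg (by omega)]
          rw [show counter - (x - save - 1) = counter from by omega, ← hmatch]
        · intro _
          constructor
          · have h1 : l[track + 1 - 1]! = x := by
              simp [List.getElem!_eq_getElem?_getD, List.getElem?_eq_getElem htlt, hx]
            omega
          · intro hlt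
            have h2 := hmono track (track + 1) (by omega) hlt
            have h1 : l[track + 1]! = l[track + 1] := by
              simp [List.getElem!_eq_getElem?_getD, List.getElem?_eq_getElem hlt]
            omega
      · rw [if_neg hmatch]
        by_cases hc0 : counter = 0
        · -- counter exhausted: A checks inp[track] == inp[track-1]+1 and breaks
          subst hc0
          rw [if_pos ⟨by exact_mod_cast htlt, rfl⟩]
          have hbreak : ¬ x =
              (PySem.List.pyGet? l ((track : Int) - 1)).getD 0 + 1 := by
            by_cases ht0 : track = 0
            · -- inp[-1] is the last = greatest element; head = last + 1 is impossible
              subst ht0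
              have hne : l ≠ [] := by intro h; subst h; simp at htlt
              have h0 : (((0 : Nat) : Int) - 1) = (-1 : Int) := by norm_num
              rw [h0, PySem.List.pyGet?_neg_one]
              rw [List.getLast?_eq_getElem?]
              have hlen1 : l.length - 1 < l.length := by
                have := List.length_pos_iff.mpr hne; omega
              rw [List.getElem?_eq_getElem hlen1]
              have hle : l[0] ≤ l[l.length - 1] := by
                rcases Nat.lt_or_ge 1 l.length with h | h
                · exact le_of_lt (hmono 0 (l.length - 1) (by omega) hlen1)
                · have : l.length = 1 := by have := List.length_pos_iff.mpr hne; omega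
                  simp [this]
              simp only [Option.getD_some]
              omega
            · -- track > 0: l[track-1] ≤ save < x and x ≠ save+1 force a gap
              have hpos : 0 < track := by omega
              obtain ⟨hle, hltf⟩ := hinv hpos
              have h2 : l[track - 1]! = l[track - 1] := by
                simp [List.getElem!_eq_getElem?_getD,
                  List.getElem?_eq_getElem (show track - 1 < l.length by omega)]
              have h3 : l[track]! = x := by
                simp [List.getElem!_eq_getElem?_getD, List.getElem?_eq_getElem htlt, hx]
              have hltx : save < x := by have := hltf htlt; omega
              have hcast : ((track : Int) - 1) = ((track - 1 : Nat) : Int) := by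
                push_cast [ht0]; omega
              rw [hcast, pyGet_sorted_at (show track - 1 < l.length by omega)]
              omega
          rw [if_neg hbreak]
          -- B also breaks: gap < 0 or gap > 0 = counter
          rw [hdrop]
          simp only [solveAltGo]
          rw [if_pos (by omega)]
          omega
        · -- spend one unit of budget
          rw [if_neg (by intro h; exact hc0 h.2)]
          rw [ih l (save + 1) (counter - 1) track hsort (by omega) (by omega) (by omega) ?_ (by omega)]
          · rw [hdrop]
            exact (solveAltGo_spend x _ save counter (by omega) hc0 hc).symm
          · intro hpos
            obtain ⟨hle, hltf⟩ := hinv hpos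
            refine ⟨by omega, fun hlt => ?_⟩
            have h1 : l[track]! = x := by
              simp [List.getElem!_eq_getElem?_getD, List.getElem?_eq_getElem htlt, hx]
            have := hltf hlt
            omega

-- ===== VERDICT (by name: the statement is the Claim_ definition above) =====
theorem solve_spec : Claim_equal_solve := by
  intro inp counter _ hpre
  unfold Spec_solve solve solve_alt
  have hsort := PySem.List.sorted_ofList_pairwise_lt (xs := inp)
  have := loopA_eq_loopB
    ((counter.toNat + (PySem.List.sorted (PySem.Set.ofList inp) (fun x => x) false).length + 1))
    (PySem.List.sorted (PySem.Set.ofList inp) (fun x => x) false) 0 counter 0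
    hsort le_rfl hpre (by omega) (by omega) (by omega)
  simpa using this
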